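-- pv_equiv track=rewrite | github.com/henrylei2000/cs | 21/exam/dict_palindrome.py | build_palindromes
-- ===== SOURCE A (Python) =====
-- def sanitize(string):
--     edited = ''
--     for letter in string:
--         if letter.isalpha():
--             edited += letter
--     return edited
--
-- def is_palindrome(string):
--     # check if string is symmetric
--     if len(string) == 0:  # base case
--         return True
--     if string[0] != string[len(string) - 1]:
--         return False
--     else:
--         # change parameter for recursive call
--         return is_palindrome(string[1:len(string) - 1])
--
-- def build_palindromes(words):
--     """
--     purpose: create a list of palindromes
--     params:
--         words (list)
--     return (list): list of palindromes
--     """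
--     palindromes = []  # accumulator pattern
--     for word in words:
--         # ignore upper initial, length == 1
--         sanitized = sanitize(word)
--         if len(sanitized) > 1 and not sanitized[0].isupper():
--             if is_palindrome(sanitized):
--                 palindromes.append(word)
--
--     return palindromes
-- ===== SOURCE B (Python) =====
-- def build_palindromes(words):
--     """
--     purpose: create a list of palindromes
--     params:
--         words (list)
--     return (list): list of palindromes
--     """
--     def keep(word):
--         s = [c for c in word if c.isalpha()]
--         if len(s) < 2 or s[0].isupper():
--             return False
--         i, j = 0, len(s) - 1
--         while i < j:
--             if s[i] != s[j]:
--                 return False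
--             i += 1
--             j -= 1
--         return True
--     return [w for w in words if keep(w)]
-- ===== Notes on version B (the rewrite author's own statement) =====
-- stated objective: alternative
-- what changed: Replaces A's recursive palindrome check (which slices a fresh copy of the string at every level) and its string-concatenation sanitizer with a per-word list-comprehension filter plus an in-place two-pointer index scan, and the accumulator loop with a comprehension.
import Mathlib
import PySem

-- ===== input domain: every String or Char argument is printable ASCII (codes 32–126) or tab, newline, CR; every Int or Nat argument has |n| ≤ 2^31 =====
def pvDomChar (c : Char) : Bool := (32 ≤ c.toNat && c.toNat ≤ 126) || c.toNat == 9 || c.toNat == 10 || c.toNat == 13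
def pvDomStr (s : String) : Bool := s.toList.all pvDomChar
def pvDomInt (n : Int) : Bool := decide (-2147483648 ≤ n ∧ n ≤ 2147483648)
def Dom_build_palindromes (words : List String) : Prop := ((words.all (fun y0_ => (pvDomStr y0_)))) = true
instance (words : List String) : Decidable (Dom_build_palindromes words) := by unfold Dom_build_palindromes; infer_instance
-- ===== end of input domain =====

-- B replaces A's slice-per-level recursive palindrome check and string-concatenation
-- sanitizer with a per-word filter and a two-pointer index scan (objective: alternative).

-- ===== PORT A =====
-- sanitize: accumulate the alphabetic characters by repeated append
def pvSanitize (s : String) : List Char :=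
  s.toList.foldl (fun ed c => if PySem.Chars.isalpha c then ed ++ [c] else ed) []

-- is_palindrome: compare the ends, recurse on the slice s[1:len-1]
def pvIsPal (s : List Char) : Bool :=
  if s.length = 0 then true
  else if PySem.List.pyGetD s 0 ' ' ≠ PySem.List.pyGetD s ((s.length : Int) - 1) ' ' then false
  else pvIsPal (PySem.List.slice s (some 1) (some ((s.length : Int) - 1)))
termination_by s.length
decreasing_by
  rename_i h _
  rw [PySem.List.slice_toNat s (by norm_num) (by omega)]
  simp only [List.length_take, List.length_drop]
  omega

def build_palindromes (words : List String) : List String :=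
  words.foldl (fun pals word =>
    let sanitized := pvSanitize word
    if sanitized.length > 1 && !(PySem.Chars.isupper (PySem.List.pyGetD sanitized 0 ' ')) then
      if pvIsPal sanitized then pals ++ [word] else pals
    else pals) []

-- ===== PORT B =====
-- two-pointer scan: while i < j compare s[i] with s[j]
def pvTwoPtr (s : List Char) (i j : Nat) : Bool :=
  if i < j then
    if PySem.List.pyGetD s (i : Int) ' ' ≠ PySem.List.pyGetD s (j : Int) ' ' then false
    else pvTwoPtr s (i + 1) (j - 1)
  else true
termination_by j - i

def pvKeep (w : String) : Bool :=
  let s := w.toList.filter (fun c => PySem.Chars.isalpha c)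
  if s.length < 2 || PySem.Chars.isupper (s.headD ' ') then false
  else pvTwoPtr s 0 (s.length - 1)

def build_palindromes_alt (words : List String) : List String :=
  words.filter pvKeep

-- ===== PRECONDITION & SPEC =====
def Spec_build_palindromes (words : List String) (out : List String) : Prop := out = build_palindromes_alt words
instance (words : List String) (out : List String) : Decidable (Spec_build_palindromes words out) := by unfold Spec_build_palindromes; infer_instance

-- ===== CLAIM (what is proved, stated in full; the proofs are below) =====
def Claim_equal_build_palindromes : Prop := ∀ (words : List String), Dom_build_palindromes words → Spec_build_palindromes words (build_palindromes words)

-- ===== LEMMAS AND PROOFS =====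

theorem pvIsPal_def (s : List Char) :
    pvIsPal s =
      if s.length = 0 then true
      else if PySem.List.pyGetD s 0 ' ' ≠ PySem.List.pyGetD s ((s.length : Int) - 1) ' ' then false
      else pvIsPal (PySem.List.slice s (some 1) (some ((s.length : Int) - 1))) := by
  conv_lhs => rw [pvIsPal.eq_def]

theorem pvTwoPtr_def (s : List Char) (i j : Nat) :
    pvTwoPtr s i j =
      if i < j then
        if PySem.List.pyGetD s (i : Int) ' ' ≠ PySem.List.pyGetD s (j : Int) ' ' then false
        else pvTwoPtr s (i + 1) (j - 1)
      else true := by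
  conv_lhs => rw [pvTwoPtr.eq_def]

-- sanitize is filter
theorem pvSanitize_eq (s : String) :
    pvSanitize s = s.toList.filter (fun c => PySem.Chars.isalpha c) := by
  unfold pvSanitize
  suffices h : ∀ (l : List Char) (acc : List Char),
      l.foldl (fun ed c => if PySem.Chars.isalpha c then ed ++ [c] else ed) acc
        = acc ++ l.filter (fun c => PySem.Chars.isalpha c) by
    simpa using h s.toList []
  intro l
  induction l with
  | nil => simp
  | cons a t ih =>
    intro acc
    by_cases ha : PySem.Chars.isalpha a <;> simp [List.foldl_cons, ha, ih]

-- A's recursive checker decides "reverse-equal"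
theorem pvIsPal_eq (s : List Char) : pvIsPal s = decide (s.reverse = s) := by
  induction s using List.bidirectionalRec with
  | nil => rw [pvIsPal_def]; simp
  | singleton a =>
    rw [pvIsPal_def]
    simp [PySem.List.slice]
    rw [pvIsPal_def]; simp
  | cons_append a m b ih =>
    rw [pvIsPal_def]
    have hget0 : PySem.List.pyGetD (a :: (m ++ [b])) 0 ' ' = a := by
      simp [PySem.List.pyGetD_zero_cons]
    have hcast : (((a :: (m ++ [b])).length : Int) - 1) = ((m.length + 1 : Nat) : Int) := by
      simp
    have hgetL : PySem.List.pyGetD (a :: (m ++ [b])) (((a :: (m ++ [b])).length : Int) - 1) ' ' = b := by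
      rw [hcast, PySem.List.pyGetD_natCast]
      simp [List.getD]
    have hslice : PySem.List.slice (a :: (m ++ [b])) (some 1) (some (((a :: (m ++ [b])).length : Int) - 1)) = m := by
      rw [PySem.List.slice_toNat (a :: (m ++ [b])) (by norm_num) (by omega)]
      have h3 : (((a :: (m ++ [b])).length : Int) - 1).toNat = m.length + 1 := by
        simp
      rw [h3]
      simp
    rw [hget0, hgetL, hslice, ih]
    by_cases hab : a = b
    · subst hab
      simp
    · simp [hab]

-- shifting the two-pointer scan past one leading and one trailing element
theorem pvTwoPtr_shift (a b : Char) (m : List Char) :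
    ∀ (k i j : Nat), j - i ≤ k → j < m.length →
      pvTwoPtr (a :: (m ++ [b])) (i + 1) (j + 1) = pvTwoPtr m i j := by
  intro k
  induction k with
  | zero =>
    intro i j hk _
    rw [pvTwoPtr_def (a :: (m ++ [b])), pvTwoPtr_def m]
    have : ¬ i < j := by omega
    simp [this, show ¬ i + 1 < j + 1 by omega]
  | succ n ih =>
    intro i j hk hj
    by_cases hij : i < j
    · rw [pvTwoPtr_def (a :: (m ++ [b])), pvTwoPtr_def m]
      have h1 : i + 1 < j + 1 := by omega
      have hi' : PySem.List.pyGetD (a :: (m ++ [b])) ((i + 1 : Nat) : Int) ' '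
          = PySem.List.pyGetD m ((i : Nat) : Int) ' ' := by
        rw [PySem.List.pyGetD_natCast, PySem.List.pyGetD_natCast]
        simp [List.getD, List.getElem?_append_left (by omega : i < m.length)]
      have hj' : PySem.List.pyGetD (a :: (m ++ [b])) ((j + 1 : Nat) : Int) ' '
          = PySem.List.pyGetD m ((j : Nat) : Int) ' ' := by
        rw [PySem.List.pyGetD_natCast, PySem.List.pyGetD_natCast]
        simp [List.getD, List.getElem?_append_left hj]
      rw [if_pos h1, if_pos hij]
      push_cast at hi' hj' ⊢
      rw [hi', hj']
      by_cases hne : PySem.List.pyGetD m (i : Int) ' ' = PySem.List.pyGetD m (j : Int) ' '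
      · simp only [hne, ne_eq, not_true_eq_false, if_false]
        have hj1 : j = (j - 1) + 1 := by omega
        conv_lhs => rw [hj1]
        exact ih (i + 1) (j - 1) (by omega) (by omega)
      · rw [if_pos (by simpa using hne), if_pos (by simpa using hne)]
    · rw [pvTwoPtr_def (a :: (m ++ [b])), pvTwoPtr_def m]
      simp [hij, show ¬ i + 1 < j + 1 by omega]

-- the two-pointer scan decides "reverse-equal"
theorem pvTwoPtr_eq (s : List Char) :
    pvTwoPtr s 0 (s.length - 1) = decide (s.reverse = s) := by
  induction s using List.bidirectionalRec with
  | nil => rw [pvTwoPtr_def]; simp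
  | singleton a => rw [pvTwoPtr_def]; simp
  | cons_append a m b ih =>
    rw [pvTwoPtr_def]
    have hlen : (a :: (m ++ [b])).length = m.length + 2 := by simp
    rw [hlen]
    have hlt : 0 < m.length + 2 - 1 := by omega
    rw [if_pos hlt]
    have hget0 : PySem.List.pyGetD (a :: (m ++ [b])) ((0 : Nat) : Int) ' ' = a := by
      simp [PySem.List.pyGetD_zero_cons]
    have hgetL : PySem.List.pyGetD (a :: (m ++ [b])) ((m.length + 2 - 1 : Nat) : Int) ' ' = b := by
      rw [PySem.List.pyGetD_natCast]
      have h2 : m.length + 2 - 1 = m.length + 1 := by omega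
      rw [h2]
      simp [List.getD]
    push_cast at hget0 hgetL ⊢
    rw [hget0, hgetL]
    by_cases hab : a = b
    · subst hab
      rw [if_neg (by simp)]
      by_cases hm : m = []
      · subst hm
        rw [pvTwoPtr_def]
        simp
      · have hml : 1 ≤ m.length := List.length_pos_iff.mpr hm
        have hmm : m.length = (m.length - 1) + 1 := by omega
        have h1 : pvTwoPtr (a :: (m ++ [a])) 1 m.length = pvTwoPtr m 0 (m.length - 1) := by
          conv_lhs => rw [show (1 : Nat) = 0 + 1 from rfl, hmm]
          exact pvTwoPtr_shift a a m m.length 0 (m.length - 1) (by omega) (by omega)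
        rw [h1, ih]
        simp
    · rw [if_pos (by simpa using hab)]
      simp [hab]

-- A's per-word test equals B's pvKeep
theorem keep_eq (w : String) :
    (let sanitized := pvSanitize w
     if sanitized.length > 1 && !(PySem.Chars.isupper (PySem.List.pyGetD sanitized 0 ' ')) then
       pvIsPal sanitized
     else false) = pvKeep w := by
  unfold pvKeep
  rw [pvSanitize_eq]
  dsimp only
  set s := w.toList.filter (fun c => PySem.Chars.isalpha c) with hs
  have hhead : PySem.List.pyGetD s 0 ' ' = s.headD ' ' := by
    have h0 : (0 : Int) = ((0 : Nat) : Int) := rfl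
    rw [h0, PySem.List.pyGetD_natCast]
    cases s <;> simp [List.getD]
  rw [hhead, pvIsPal_eq, ← pvTwoPtr_eq]
  by_cases h1 : s.length > 1
  · have h2 : ¬ s.length < 2 := by omega
    by_cases hu : PySem.Chars.isupper (s.headD ' ')
    · simp [h1, h2]
    · simp [h1, h2]
  · have h2 : s.length < 2 := by omega
    by_cases hu : PySem.Chars.isupper (s.headD ' ')
    · simp [h1, h2]
    · simp [h1, h2]

-- the accumulator loop is a filter
theorem foldl_filter (f : String → Bool) :
    ∀ (l acc : List String),
      l.foldl (fun pals word => if f word then pals ++ [word] else pals) acc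
        = acc ++ l.filter f := by
  intro l
  induction l with
  | nil => simp
  | cons a t ih =>
    intro acc
    by_cases ha : f a <;> simp [List.foldl_cons, ha, ih]

-- ===== VERDICT (by name: the statement is the Claim_ definition above) =====
theorem build_palindromes_spec : Claim_equal_build_palindromes := by
  intro words _
  unfold Spec_build_palindromes build_palindromes build_palindromes_alt
  have hbody : ∀ (pals : List String) (word : String),
      (let sanitized := pvSanitize word
       if sanitized.length > 1 && !(PySem.Chars.isupper (PySem.List.pyGetD sanitized 0 ' ')) then
         if pvIsPal sanitized then pals ++ [word] else pals
       else pals)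
      = (if pvKeep word then pals ++ [word] else pals) := by
    intro pals word
    have hk := keep_eq word
    simp only at hk ⊢
    rw [← hk]
    by_cases hg : (pvSanitize word).length > 1 && !(PySem.Chars.isupper (PySem.List.pyGetD (pvSanitize word) 0 ' '))
    · simp [hg]
    · simp [hg]
  calc words.foldl (fun pals word =>
          let sanitized := pvSanitize word
          if sanitized.length > 1 && !(PySem.Chars.isupper (PySem.List.pyGetD sanitized 0 ' ')) then
            if pvIsPal sanitized then pals ++ [word] else pals
          else pals) []
      = words.foldl (fun pals word => if pvKeep word then pals ++ [word] else pals) [] := by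
        exact PySem.List.foldl_congr_mem words _ _ [] (fun acc x _ => hbody acc x)
    _ = words.filter pvKeep := by simpa using foldl_filter pvKeep words []
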